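-- pv_equiv track=rewrite | github.com/anina512/ml-gpu-scheduler-and-cloud-partitioner | ml-gpu-scheduler/greedy_gpu_budget_experiments.py | greedy_max_count
-- ===== SOURCE A (Python) =====
-- from typing import List, Tuple
--
-- def greedy_max_count(durations: List[int], budget: int) -> Tuple[int, List[int]]:
--     """
--     Greedy algorithm: sort jobs by ascending duration and take while feasible.
--
--     Parameters
--     ----------
--     durations : list of positive ints
--         GPU-hours for each model.
--     budget : int
--         Total GPU-hour budget.
--
--     Returns
--     -------
--     (count, chosen_indices)
--         Maximum number of models selected by greedy and their indices.
--     """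
--     order = sorted(range(len(durations)), key=lambda i: durations[i])
--     total = 0
--     chosen = []
--     for i in order:
--         if total + durations[i] <= budget:
--             chosen.append(i)
--             total += durations[i]
--         else:
--             break
--     return len(chosen), chosen
-- ===== SOURCE B (Python) =====
-- from typing import List, Tuple
--
-- def greedy_max_count(durations: List[int], budget: int) -> Tuple[int, List[int]]:
--     order = sorted(range(len(durations)), key=lambda i: durations[i])
--     prefix = []
--     s = 0
--     for i in order:
--         s += durations[i]
--         prefix.append(s)
--     cutoff = next((k for k, c in enumerate(prefix) if c > budget), len(prefix))
--     return cutoff, order[:cutoff]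
-- ===== Notes on version B (the rewrite author's own statement) =====
-- stated objective: alternative
-- what changed: A's single greedy loop with a running total and conditional break is replaced by building the full prefix-sum table over the sorted order, locating the cutoff as the first prefix value exceeding the budget, and returning that count with a slice of the order.
import Mathlib
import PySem

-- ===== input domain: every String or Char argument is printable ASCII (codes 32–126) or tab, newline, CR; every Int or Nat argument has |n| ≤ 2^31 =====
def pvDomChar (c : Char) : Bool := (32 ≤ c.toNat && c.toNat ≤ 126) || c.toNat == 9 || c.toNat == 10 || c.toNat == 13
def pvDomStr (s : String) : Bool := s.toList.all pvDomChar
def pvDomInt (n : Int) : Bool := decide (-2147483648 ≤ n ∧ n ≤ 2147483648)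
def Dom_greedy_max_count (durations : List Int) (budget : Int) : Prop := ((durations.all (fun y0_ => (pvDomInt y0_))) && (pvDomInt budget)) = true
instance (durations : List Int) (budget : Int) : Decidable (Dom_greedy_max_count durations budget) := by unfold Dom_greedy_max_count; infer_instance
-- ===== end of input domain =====

-- B replaces A's greedy running-total loop+break with a full prefix-sum table, a first-exceedance cutoff search, and a slice (alternative decomposition, same cost).


-- ===== PORT A =====
-- the for-loop over `order` with running total, append and break
def pvGoA (durations : List Int) (budget : Int) : List Int → Int → List Int → List Int
  | [], _, chosen => chosen
  | i :: rest, total, chosen =>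
    if total + PySem.List.pyGetD durations i 0 ≤ budget then
      pvGoA durations budget rest (total + PySem.List.pyGetD durations i 0) (chosen ++ [i])
    else chosen

def greedy_max_count (durations : List Int) (budget : Int) : Int × List Int :=
  let order := PySem.List.sorted (PySem.List.pyRange 0 durations.length 1)
      (fun i => PySem.List.pyGetD durations i 0) false
  let chosen := pvGoA durations budget order 0 []
  ((chosen.length : Int), chosen)

-- ===== PORT B =====
-- the loop building the prefix-sum table over `order`
def pvPrefix (durations : List Int) : List Int → Int → List Int
  | [], _ => []
  | i :: rest, s =>
    (s + PySem.List.pyGetD durations i 0) :: pvPrefix durations rest (s + PySem.List.pyGetD durations i 0)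

-- next((k for k, c in enumerate(prefix) if c > budget), len(prefix))
def pvCutoff (budget : Int) : List Int → Int
  | [] => 0
  | c :: cs => if budget < c then 0 else 1 + pvCutoff budget cs

def greedy_max_count_alt (durations : List Int) (budget : Int) : Int × List Int :=
  let order := PySem.List.sorted (PySem.List.pyRange 0 durations.length 1)
      (fun i => PySem.List.pyGetD durations i 0) false
  let pfx := pvPrefix durations order 0
  let cutoff := pvCutoff budget pfx
  (cutoff, PySem.List.slice order none (some cutoff))

-- ===== PRECONDITION & SPEC =====
def Spec_greedy_max_count (durations : List Int) (budget : Int) (out : Int × List Int) : Prop := out = greedy_max_count_alt durations budget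
instance (durations : List Int) (budget : Int) (out : Int × List Int) : Decidable (Spec_greedy_max_count durations budget out) := by unfold Spec_greedy_max_count; infer_instance

-- ===== CLAIM (what is proved, stated in full; the proofs are below) =====
def Claim_equal_greedy_max_count : Prop := ∀ (durations : List Int) (budget : Int), Dom_greedy_max_count durations budget → Spec_greedy_max_count durations budget (greedy_max_count durations budget)

-- ===== LEMMAS AND PROOFS =====

theorem pvGoA_append (durations : List Int) (budget : Int) :
    ∀ (xs : List Int) (t : Int) (ch : List Int),
      pvGoA durations budget xs t ch = ch ++ pvGoA durations budget xs t [] := by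
  intro xs
  induction xs with
  | nil => intro t ch; simp [pvGoA]
  | cons i rest ih =>
    intro t ch
    simp only [pvGoA]
    by_cases h : t + PySem.List.pyGetD durations i 0 ≤ budget
    · simp only [if_pos h]
      rw [ih _ (ch ++ [i])]
      simp only [List.nil_append]
      rw [ih _ [i]]
      simp
    · simp [if_neg h]

theorem pvCutoff_nonneg (budget : Int) : ∀ (cs : List Int), 0 ≤ pvCutoff budget cs := by
  intro cs
  induction cs with
  | nil => simp [pvCutoff]
  | cons c cs ih => simp only [pvCutoff]; split_ifs <;> omega

theorem pvCutoff_le_length (budget : Int) : ∀ (cs : List Int), pvCutoff budget cs ≤ cs.length := by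
  intro cs
  induction cs with
  | nil => simp [pvCutoff]
  | cons c cs ih => simp only [pvCutoff, List.length_cons]; split_ifs <;> push_cast <;> omega

theorem pvPrefix_length (durations : List Int) :
    ∀ (xs : List Int) (s : Int), (pvPrefix durations xs s).length = xs.length := by
  intro xs
  induction xs with
  | nil => intro s; simp [pvPrefix]
  | cons i rest ih => intro s; simp [pvPrefix, ih]

theorem pvGoA_eq_take (durations : List Int) (budget : Int) :
    ∀ (xs : List Int) (t : Int),
      pvGoA durations budget xs t [] =
        xs.take (pvCutoff budget (pvPrefix durations xs t)).toNat := by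
  intro xs
  induction xs with
  | nil => intro t; simp [pvGoA, pvPrefix, pvCutoff]
  | cons i rest ih =>
    intro t
    simp only [pvGoA, pvPrefix, pvCutoff]
    by_cases h : t + PySem.List.pyGetD durations i 0 ≤ budget
    · have hnb : ¬ budget < t + PySem.List.pyGetD durations i 0 := not_lt.mpr h
      simp only [if_pos h, if_neg hnb]
      rw [pvGoA_append, ih]
      have h0 := pvCutoff_nonneg budget (pvPrefix durations rest (t + PySem.List.pyGetD durations i 0))
      have : (1 + pvCutoff budget (pvPrefix durations rest (t + PySem.List.pyGetD durations i 0))).toNat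
          = (pvCutoff budget (pvPrefix durations rest (t + PySem.List.pyGetD durations i 0))).toNat + 1 := by
        omega
      rw [this]
      simp [List.take_succ_cons]
    · have hb : budget < t + PySem.List.pyGetD durations i 0 := not_le.mp h
      simp [if_neg h, if_pos hb]

-- ===== VERDICT (by name: the statement is the Claim_ definition above) =====
theorem greedy_max_count_spec : Claim_equal_greedy_max_count := by
  intro durations budget _
  unfold Spec_greedy_max_count greedy_max_count greedy_max_count_alt
  simp only []
  set order := PySem.List.sorted (PySem.List.pyRange 0 durations.length 1)
      (fun i => PySem.List.pyGetD durations i 0) false with horder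
  set k := pvCutoff budget (pvPrefix durations order 0) with hk
  have h0 : 0 ≤ k := pvCutoff_nonneg budget _
  have hle : k ≤ order.length := by
    have := pvCutoff_le_length budget (pvPrefix durations order 0)
    rwa [pvPrefix_length] at this
  have hchosen : pvGoA durations budget order 0 [] = order.take k.toNat :=
    pvGoA_eq_take durations budget order 0
  have hslice : PySem.List.slice order none (some k) = order.take k.toNat :=
    PySem.List.slice_to order h0
  simp only [hchosen, hslice]
  refine Prod.ext ?_ rfl
  simp only [List.length_take]
  omega
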